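-- pv_equiv track=rewrite | github.com/leshless/study | operating_systems/phw_01/main_test.py | get_result_numbers
-- ===== SOURCE A (Python) =====
-- def get_result_numbers(numbers):
--     numbers = list(reversed(numbers))
--
--     j = None
--     for i in range(len(numbers)):
--         if numbers[i] > 0:
--             j = i
--             break
--
--     if j != None:
--         del numbers[j]
--
--     return numbers
-- ===== SOURCE B (Python) =====
-- def get_result_numbers(numbers):
--     result = []
--     removed = False
--     for x in reversed(numbers):
--         if not removed and x > 0:
--             removed = True
--             continue
--         result.append(x)
--     return result
-- ===== Notes on version B (the rewrite author's own statement) =====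
-- stated objective: simpler
-- what changed: Single filtering pass over reversed(numbers) with a one-shot 'removed' flag, replacing A's materialized reverse + index scan + del-by-index.
import Mathlib
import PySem

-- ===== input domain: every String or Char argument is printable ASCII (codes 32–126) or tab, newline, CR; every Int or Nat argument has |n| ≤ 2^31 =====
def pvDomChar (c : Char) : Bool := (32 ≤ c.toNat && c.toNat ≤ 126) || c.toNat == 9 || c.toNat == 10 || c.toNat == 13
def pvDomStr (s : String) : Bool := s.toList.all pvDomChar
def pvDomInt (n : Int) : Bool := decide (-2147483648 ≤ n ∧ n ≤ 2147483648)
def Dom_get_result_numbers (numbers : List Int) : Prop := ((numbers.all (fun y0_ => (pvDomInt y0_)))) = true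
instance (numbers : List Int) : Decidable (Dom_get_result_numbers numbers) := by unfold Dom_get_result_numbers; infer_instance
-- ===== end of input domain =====

-- B replaces A's materialized reverse + index scan + del-by-index with one filtering pass
-- over the reversed list using a one-shot 'removed' flag (objective: simpler).

-- ===== PORT A =====
-- the 'for i in range(len(numbers)): if numbers[i] > 0: j = i; break' scan
def pvFirstPosIdx : List Int → Nat → Option Nat
  | [], _ => none
  | x :: xs, i => if x > 0 then some i else pvFirstPosIdx xs (i + 1)

def get_result_numbers (numbers : List Int) : List Int :=
  let numbers := numbers.reverse
  match pvFirstPosIdx numbers 0 with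
  | some j => numbers.eraseIdx j   -- del numbers[j]
  | none => numbers

-- ===== PORT B =====
def get_result_numbers_alt (numbers : List Int) : List Int :=
  (numbers.reverse.foldl
    (fun (st : List Int × Bool) x =>
      if !st.2 && x > 0 then (st.1, true) else (st.1 ++ [x], st.2))
    ([], false)).1

-- ===== PRECONDITION & SPEC =====
def Spec_get_result_numbers (numbers : List Int) (out : List Int) : Prop := out = get_result_numbers_alt numbers
instance (numbers : List Int) (out : List Int) : Decidable (Spec_get_result_numbers numbers out) := by unfold Spec_get_result_numbers; infer_instance

-- ===== CLAIM (what is proved, stated in full; the proofs are below) =====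
def Claim_equal_get_result_numbers : Prop := ∀ (numbers : List Int), Dom_get_result_numbers numbers → Spec_get_result_numbers numbers (get_result_numbers numbers)

-- ===== LEMMAS AND PROOFS =====

theorem pvFirstPosIdx_shift (l : List Int) (i : Nat) :
    pvFirstPosIdx l (i + 1) = (pvFirstPosIdx l i).map (· + 1) := by
  induction l generalizing i with
  | nil => simp [pvFirstPosIdx]
  | cons x xs ih =>
    simp only [pvFirstPosIdx]
    split_ifs with h
    · simp
    · exact ih (i + 1)

theorem portA_eraseP (l : List Int) :
    (match pvFirstPosIdx l 0 with
     | some j => l.eraseIdx j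
     | none => l) = l.eraseP (fun x => decide (0 < x)) := by
  induction l with
  | nil => simp [pvFirstPosIdx]
  | cons x xs ih =>
    simp only [pvFirstPosIdx]
    by_cases h : x > 0
    · simp [h, List.eraseIdx]
    · rw [if_neg h, pvFirstPosIdx_shift]
      have h' : ¬ (0 < x) := h
      simp only [List.eraseP_cons, h', decide_false]
      cases hc : pvFirstPosIdx xs 0 with
      | none => simp [hc] at ih ⊢; simpa using ih
      | some j =>
        simp [hc] at ih ⊢
        simp [ih]

theorem foldB_true (l acc : List Int) :
    l.foldl
      (fun (st : List Int × Bool) x =>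
        if !st.2 && x > 0 then (st.1, true) else (st.1 ++ [x], st.2))
      (acc, true) = (acc ++ l, true) := by
  induction l generalizing acc with
  | nil => simp
  | cons x xs ih =>
    rw [List.foldl_cons]
    have hstep : (if (!((acc : List Int), true).2 && decide (x > 0)) = true
          then (((acc : List Int), true).1, true)
          else (((acc : List Int), true).1 ++ [x], ((acc : List Int), true).2))
        = ((acc ++ [x] : List Int), true) := by simp
    rw [hstep, ih]
    simp

theorem foldB_false (l acc : List Int) :
    (l.foldl
      (fun (st : List Int × Bool) x =>
        if !st.2 && x > 0 then (st.1, true) else (st.1 ++ [x], st.2))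
      (acc, false)).1 = acc ++ l.eraseP (fun x => decide (0 < x)) := by
  induction l generalizing acc with
  | nil => simp
  | cons x xs ih =>
    rw [List.foldl_cons]
    by_cases h : x > 0
    · have hstep : (if (!((acc : List Int), false).2 && decide (x > 0)) = true
            then (((acc : List Int), false).1, true)
            else (((acc : List Int), false).1 ++ [x], ((acc : List Int), false).2))
          = ((acc : List Int), true) := by simp [h]
      rw [hstep, foldB_true, List.eraseP_cons]
      simp [h]
    · have h' : ¬ (0 < x) := h
      have hstep : (if (!((acc : List Int), false).2 && decide (x > 0)) = true
            then (((acc : List Int), false).1, true)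
            else (((acc : List Int), false).1 ++ [x], ((acc : List Int), false).2))
          = ((acc ++ [x] : List Int), false) := by simp [h]
      rw [hstep, ih, List.eraseP_cons]
      simp [h']

-- ===== VERDICT (by name: the statement is the Claim_ definition above) =====
theorem get_result_numbers_spec : Claim_equal_get_result_numbers := by
  intro numbers _
  unfold Spec_get_result_numbers get_result_numbers get_result_numbers_alt
  rw [foldB_false, List.nil_append]
  exact portA_eraseP numbers.reverse
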